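-- pv_equiv track=rewrite | github.com/GUMI-21/MIT6.006_note | week3 Linear Sort/Problem_set3/p3.py | find_nocollisions_hashing
-- ===== SOURCE A (Python) =====
-- def find_nocollisions_hashing(A):
--     i = 0
--     while True:
--         i = i + 1
--         if i > 100:  # max number limit
--             return 0
--         b = []
--         for j in range(len(A)):
--             res = ((10*A[j] + 4) % i) % 7
--             if res in b:
--                 break
--             b.append(res)
--             if j == len(A) - 1:
--                 return i
-- ===== SOURCE B (Python) =====
-- def find_nocollisions_hashing(A):
--     if not A:
--         return 0
--     if len(set(A)) != len(A) or len(A) > 7: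
--         # a repeated value collides for every i, and hashes lie in 0..6 (pigeonhole)
--         return 0
--     candidates = list(range(1, 101))
--     for k in range(len(A)):
--         for l in range(k + 1, len(A)):
--             x, y = A[k], A[l]
--             candidates = [i for i in candidates
--                           if ((10 * x + 4) % i) % 7 != ((10 * y + 4) % i) % 7]
--     return candidates[0] if candidates else 0
-- ===== Notes on version B (the rewrite author's own statement) =====
-- stated objective: alternative
-- what changed: Instead of scanning i=1..100 and growing a hash list with membership checks, B first returns 0 outright when A has a repeated value or more than 7 elements (hashes lie in 0..6, so every i collides by pigeonhole), and otherwise sieves the candidate set {1..100} pair by pair, deleting every i on which two elements hash equal, returning the smallest survivor.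
import Mathlib
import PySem

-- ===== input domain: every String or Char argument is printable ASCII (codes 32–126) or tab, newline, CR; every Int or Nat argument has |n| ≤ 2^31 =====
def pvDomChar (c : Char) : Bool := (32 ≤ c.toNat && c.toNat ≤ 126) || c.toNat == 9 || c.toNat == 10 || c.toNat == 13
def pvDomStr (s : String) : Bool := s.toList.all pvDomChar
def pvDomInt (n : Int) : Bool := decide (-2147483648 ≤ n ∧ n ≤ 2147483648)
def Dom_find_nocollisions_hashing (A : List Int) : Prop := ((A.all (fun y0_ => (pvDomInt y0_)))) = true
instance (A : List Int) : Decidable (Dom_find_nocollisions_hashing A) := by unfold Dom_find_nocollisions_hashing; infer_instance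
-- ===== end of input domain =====

-- B replaces A's i-outer scan (incremental hash list with membership check and break) by a
-- pigeonhole/duplicate shortcut (hashes lie in 0..6, so duplicates or more than 7 elements force
-- 0) followed by a pair-driven sieve that eliminates candidates i from {1..100} pair by pair.

-- ===== PORT A =====
-- inner 'for j in range(len(A))' loop: some i = the 'return i' inside it; none = loop left by break / end
def pvInnerA (A : List Int) (i : Int) (j : Nat) (b : List Int) : Option Int :=
  if _h : j < A.length then
    let res := PySem.Int.mod (PySem.Int.mod (10 * PySem.List.pyGetD A (j : Int) 0 + 4) i) 7
    if res ∈ b then none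
    else if j = A.length - 1 then some i
    else pvInnerA A i (j + 1) (b ++ [res])
  else none
termination_by A.length - j

-- outer 'while True' loop, entered with the already-incremented i
def pvOuterA (A : List Int) (i : Int) : Int :=
  if i > 100 then 0
  else
    match pvInnerA A i 0 [] with
    | some r => r
    | none => pvOuterA A (i + 1)
termination_by (101 - i).toNat
decreasing_by omega

def find_nocollisions_hashing (A : List Int) : Int := pvOuterA A 1

-- ===== PORT B =====
-- ((10*x + 4) % i) % 7
def pvHash (x i : Int) : Int := PySem.Int.mod (PySem.Int.mod (10 * x + 4) i) 7

-- the nested 'for k … for l …' pair loops sieving the candidate list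
def pvSieve (A : List Int) : List Int :=
  (List.range A.length).foldl (fun (c : List Int) (k : Nat) =>
    (List.range' (k + 1) (A.length - (k + 1))).foldl (fun (c : List Int) (l : Nat) =>
      c.filter (fun i =>
        pvHash (PySem.List.pyGetD A (k : Int) 0) i ≠ pvHash (PySem.List.pyGetD A (l : Int) 0) i)) c)
    (PySem.List.pyRange 1 101 1)

def find_nocollisions_hashing_alt (A : List Int) : Int :=
  if A = [] then 0
  else if (PySem.Set.ofList A).length ≠ A.length ∨ 7 < A.length then 0
  else
    match pvSieve A with
    | [] => 0
    | i :: _ => i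

-- ===== PRECONDITION & SPEC =====
def Spec_find_nocollisions_hashing (A : List Int) (out : Int) : Prop := out = find_nocollisions_hashing_alt A
instance (A : List Int) (out : Int) : Decidable (Spec_find_nocollisions_hashing A out) := by unfold Spec_find_nocollisions_hashing; infer_instance

-- ===== CLAIM (what is proved, stated in full; the proofs are below) =====
def Claim_equal_find_nocollisions_hashing : Prop := ∀ (A : List Int), Dom_find_nocollisions_hashing A → Spec_find_nocollisions_hashing A (find_nocollisions_hashing A)

-- ===== LEMMAS AND PROOFS =====

-- the full hash list for a given i
def pvL (A : List Int) (i : Int) : List Int := A.map (fun a => pvHash a i)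

theorem pvDiscard_of_not_mem {s : List Int} {x : Int} (h : x ∉ s) :
    PySem.Set.discard s x = s := by
  simp only [PySem.Set.discard]
  apply List.filter_eq_self.mpr
  intro a ha
  have hne : a ≠ x := fun he => h (he ▸ ha)
  simp [hne]

theorem pvDiscard_len_of_mem {s : List Int} {x : Int} (hn : s.Nodup) (h : x ∈ s) :
    (PySem.Set.discard s x).length + 1 = s.length := by
  have he : PySem.Set.discard s x = s.erase x := by
    rw [List.Nodup.erase_eq_filter hn x]
    rfl
  rw [he]
  have h1 := List.length_erase_of_mem h
  have h2 : 0 < s.length := List.length_pos_of_mem h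
  omega

theorem pvSetLen_iff (l : List Int) :
    (PySem.Set.ofList l).length = l.length ↔ l.Nodup := by
  induction l with
  | nil => simp
  | cons x xs ih =>
    rw [PySem.Set.ofList_cons]
    by_cases hx : x ∈ xs
    · have hm : x ∈ PySem.Set.ofList xs := (PySem.Set.mem_ofList _ _).mpr hx
      have h1 := pvDiscard_len_of_mem (PySem.Set.nodup_ofList xs) hm
      have h2 := PySem.Set.length_ofList_le xs
      simp only [List.length_cons, List.nodup_cons]
      constructor
      · intro h; exact absurd rfl (by omega : ¬ (0 : Nat) = 0)
      · intro h; exact absurd hx h.1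
    · have hm : x ∉ PySem.Set.ofList xs := fun h => hx ((PySem.Set.mem_ofList _ _).mp h)
      rw [pvDiscard_of_not_mem hm]
      simp only [List.length_cons, List.nodup_cons]
      constructor
      · intro h; exact ⟨hx, ih.mp (by omega)⟩
      · intro h; have := ih.mpr h.2; omega

theorem pvInner_spec (A : List Int) (i : Int) :
    ∀ j b, pvInnerA A i j b =
      if j < A.length ∧ ((pvL A i).drop j).Nodup ∧ ∀ x ∈ (pvL A i).drop j, x ∉ b then
        some i
      else none := by
  intro j
  induction hfj : A.length - j using Nat.strong_induction_on generalizing j with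
  | _ n ih =>
  intro b
  rw [pvInnerA]
  by_cases hj : j < A.length
  · have hjL : j < (pvL A i).length := by simpa [pvL] using hj
    have hres : PySem.Int.mod (PySem.Int.mod (10 * PySem.List.pyGetD A (j : Int) 0 + 4) i) 7
        = (pvL A i)[j] := by
      rw [PySem.List.pyGetD_natCast]
      simp [pvL, pvHash, List.getD_eq_getElem?_getD, List.getElem?_eq_getElem hj]
    have hdrop : (pvL A i).drop j = (pvL A i)[j] :: (pvL A i).drop (j + 1) :=
      List.drop_eq_getElem_cons hjL
    simp only [dif_pos hj, hres]
    by_cases hb : (pvL A i)[j] ∈ b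
    · rw [if_pos hb, if_neg]
      rintro ⟨-, -, hall⟩
      exact hall _ (by rw [hdrop]; exact List.mem_cons_self) hb
    · rw [if_neg hb]
      by_cases hlast : j = A.length - 1
      · have : (pvL A i).drop (j + 1) = [] := by
          apply List.drop_eq_nil_of_le
          simp [pvL]; omega
        rw [if_pos hlast, if_pos]
        refine ⟨hj, ?_, ?_⟩
        · rw [hdrop, this]; simp
        · rw [hdrop, this]; simpa using hb
      · have hj1 : j + 1 < A.length := by omega
        rw [if_neg hlast, ih (A.length - (j + 1)) (by omega) (j + 1) rfl]
        have hsplit : (((pvL A i).drop j).Nodup ∧ ∀ x ∈ (pvL A i).drop j, x ∉ b)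
            ↔ (((pvL A i).drop (j + 1)).Nodup ∧
               ∀ x ∈ (pvL A i).drop (j + 1), x ∉ b ++ [(pvL A i)[j]]) := by
          rw [hdrop]
          simp only [List.nodup_cons, List.mem_cons, List.mem_append]
          constructor
          · rintro ⟨⟨hni, hnd⟩, hall⟩
            refine ⟨hnd, fun x hx => ?_⟩
            rintro (hxb | (rfl | h0))
            · exact hall x (Or.inr hx) hxb
            · exact hni hx
            · exact absurd h0 (List.not_mem_nil)
          · rintro ⟨hnd, hall⟩
            refine ⟨⟨fun hmem => hall _ hmem (Or.inr (Or.inl rfl)), hnd⟩, fun x hx hxb => ?_⟩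
            rcases hx with rfl | hx'
            · exact hb hxb
            · exact hall x hx' (Or.inl hxb)
        apply if_congr _ rfl rfl
        constructor
        · rintro ⟨-, h1, h2⟩; exact ⟨hj, (hsplit.mpr ⟨h1, h2⟩).1, (hsplit.mpr ⟨h1, h2⟩).2⟩
        · rintro ⟨-, h1, h2⟩; exact ⟨hj1, (hsplit.mp ⟨h1, h2⟩).1, (hsplit.mp ⟨h1, h2⟩).2⟩
  · rw [dif_neg hj, if_neg]
    rintro ⟨h, -⟩; exact hj h

theorem pvOuter_nil (i : Int) : pvOuterA [] i = 0 := by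
  rw [pvOuterA]
  by_cases h : i > 100
  · rw [if_pos h]
  · rw [if_neg h, pvInner_spec]
    simp only [List.length_nil]
    rw [if_neg (by rintro ⟨h0, -⟩; omega)]
    exact pvOuter_nil (i + 1)
termination_by (101 - i).toNat
decreasing_by omega

-- A's loop is the first i in [i, 101) whose whole hash list is duplicate-free
theorem pvOuter_find (A : List Int) (hA : A ≠ []) (i : Int) :
    pvOuterA A i =
      match (PySem.List.pyRange i 101 1).find? (fun k => decide (pvL A k).Nodup) with
      | some r => r
      | none => 0 := by
  rw [pvOuterA]
  by_cases h : i > 100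
  · rw [if_pos h, PySem.List.pyRange_one_eq_nil (by omega)]
    simp
  · have hlen : 0 < A.length := List.length_pos_iff.mpr hA
    rw [if_neg h, PySem.List.pyRange_one_cons (by omega), List.find?_cons,
      pvInner_spec, pvOuter_find A hA (i + 1)]
    by_cases hnd : (pvL A i).Nodup
    · rw [if_pos ⟨hlen, by simpa using hnd, by simp⟩, decide_eq_true hnd]
    · rw [if_neg (by rintro ⟨-, h1, -⟩; exact hnd (by simpa using h1)),
        decide_eq_false hnd]
termination_by (101 - i).toNat
decreasing_by omega

-- a fold of filters is one filter by the conjunction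
theorem pvFoldl_filter {α : Type} (q : α → Int → Bool) (ps : List α) (c : List Int) :
    ps.foldl (fun c p => c.filter (q p)) c = c.filter (fun i => ps.all (fun p => q p i)) := by
  induction ps generalizing c with
  | nil => simp
  | cons p ps ih =>
    rw [List.foldl_cons, ih, List.filter_filter]
    congr 1
    funext a
    simp [Bool.and_comm]

-- first element of a filter (as the 0-or-head match) is the find?
theorem pvHeadFilter (p : Int → Bool) (l : List Int) :
    (match l.filter p with | [] => (0 : Int) | i :: _ => i)
      = (match l.find? p with | none => (0 : Int) | some i => i) := by
  induction l with
  | nil => rfl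
  | cons x xs ih =>
    by_cases hx : p x
    · simp [hx]
    · simp [hx, ih]

-- the sieve predicate: all pairs of positions hash differently
def pvPairOk (A : List Int) (i : Int) : Bool :=
  (List.range A.length).all (fun (k : Nat) =>
    (List.range' (k + 1) (A.length - (k + 1))).all (fun (l : Nat) =>
      pvHash (PySem.List.pyGetD A (k : Int) 0) i ≠ pvHash (PySem.List.pyGetD A (l : Int) 0) i))

theorem pvSieve_eq_filter (A : List Int) :
    pvSieve A = (PySem.List.pyRange 1 101 1).filter (pvPairOk A) := by
  unfold pvSieve
  have hinner : (fun (c : List Int) (k : Nat) =>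
      (List.range' (k + 1) (A.length - (k + 1))).foldl (fun (c : List Int) (l : Nat) =>
        c.filter (fun i =>
          pvHash (PySem.List.pyGetD A (k : Int) 0) i ≠ pvHash (PySem.List.pyGetD A (l : Int) 0) i)) c)
      = (fun c k => c.filter (fun i =>
          (List.range' (k + 1) (A.length - (k + 1))).all (fun l =>
            pvHash (PySem.List.pyGetD A (k : Int) 0) i ≠ pvHash (PySem.List.pyGetD A (l : Int) 0) i))) := by
    funext c k
    exact pvFoldl_filter _ _ _
  rw [hinner, pvFoldl_filter]
  rfl

-- the pair predicate decides duplicate-freeness of the hash list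
theorem pvPairOk_iff (A : List Int) (i : Int) :
    pvPairOk A i = true ↔ (pvL A i).Nodup := by
  unfold pvPairOk
  rw [List.nodup_iff_getElem?_ne_getElem?]
  simp only [List.all_eq_true, List.mem_range, List.mem_range'_1, decide_eq_true_eq]
  constructor
  · intro h k l hkl hl
    have hlen : l < A.length := by simpa [pvL] using hl
    have hk : k < A.length := lt_trans hkl hlen
    have := h k hk l ⟨by omega, by omega⟩
    simp only [pvL, List.getElem?_map, List.getElem?_eq_getElem hk,
      List.getElem?_eq_getElem hlen, Option.map_some]
    intro hc
    apply this
    have hc' := Option.some.inj hc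
    rw [PySem.List.pyGetD_natCast, PySem.List.pyGetD_natCast,
      List.getD_eq_getElem?_getD, List.getD_eq_getElem?_getD,
      List.getElem?_eq_getElem hk, List.getElem?_eq_getElem hlen]
    simpa using hc'
  · intro h k hk l hl
    have hl' : l < A.length := by omega
    have := h k l (by omega) (by simpa [pvL] using hl')
    intro hc
    apply this
    simp only [pvL, List.getElem?_map, List.getElem?_eq_getElem hk,
      List.getElem?_eq_getElem hl', Option.map_some]
    rw [PySem.List.pyGetD_natCast, PySem.List.pyGetD_natCast,
      List.getD_eq_getElem?_getD, List.getD_eq_getElem?_getD,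
      List.getElem?_eq_getElem hk, List.getElem?_eq_getElem hl'] at hc
    simpa using hc

-- every hash lies in [0, 7)
theorem pvHash_bounds (x i : Int) : 0 ≤ pvHash x i ∧ pvHash x i < 7 :=
  ⟨PySem.Int.mod_nonneg _ (by omega), PySem.Int.mod_lt _ (by omega)⟩

-- duplicates in A, or more than 7 elements, kill every candidate i
theorem pvAlwaysCollide (A : List Int) (h : ¬ A.Nodup ∨ 7 < A.length) (i : Int) :
    ¬ (pvL A i).Nodup := by
  intro hnd
  rcases h with h | h
  · exact h (hnd.of_map _)
  · have hsub : (pvL A i).toFinset ⊆ Finset.Icc (0 : Int) 6 := by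
      intro x hx
      simp only [List.mem_toFinset, pvL, List.mem_map] at hx
      obtain ⟨a, -, rfl⟩ := hx
      have := pvHash_bounds a i
      simp only [Finset.mem_Icc]
      omega
    have hcard := Finset.card_le_card hsub
    rw [List.toFinset_card_of_nodup hnd] at hcard
    have hlc : (pvL A i).length = A.length := by simp [pvL]
    have : (Finset.Icc (0 : Int) 6).card = 7 := by decide
    omega

-- ===== VERDICT (by name: the statement is the Claim_ definition above) =====
theorem find_nocollisions_hashing_spec : Claim_equal_find_nocollisions_hashing := by
  intro A _
  unfold Spec_find_nocollisions_hashing find_nocollisions_hashing find_nocollisions_hashing_alt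
  by_cases hA : A = []
  · subst hA; simp [pvOuter_nil]
  · rw [if_neg hA, pvOuter_find A hA 1]
    by_cases hdeg : (PySem.Set.ofList A).length ≠ A.length ∨ 7 < A.length
    · rw [if_pos hdeg]
      have hbad : ∀ i : Int, ¬ (pvL A i).Nodup := by
        apply pvAlwaysCollide
        rcases hdeg with h | h
        · exact Or.inl (fun hnd => h ((pvSetLen_iff A).mpr hnd))
        · exact Or.inr h
      have : (PySem.List.pyRange 1 101 1).find? (fun k => decide (pvL A k).Nodup) = none := by
        apply List.find?_eq_none.mpr
        intro x _
        simpa using hbad x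
      rw [this]
    · rw [if_neg hdeg, pvSieve_eq_filter]
      have hpred : pvPairOk A = (fun k => decide (pvL A k).Nodup) := by
        funext k
        rw [Bool.eq_iff_iff, pvPairOk_iff, decide_eq_true_iff]
      rw [hpred, pvHeadFilter]
      cases (PySem.List.pyRange 1 101 1).find? (fun k => decide (pvL A k).Nodup) <;> rfl
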